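-- pv_equiv track=rewrite | github.com/hbulpf/pydemo | src/algo_cases/第6章/6_7.py | land
-- ===== SOURCE A (Python) =====
-- from collections import deque
--
-- def land(matrix):
--     length=len(matrix)
--     width=len(matrix[0])
--     re=[[0 for _ in range(width)]for _ in range(length)]
--     direction=[[1,0],[-1,0],[0,1],[0,-1]]
--     queue=deque([])
--     for i in range(length):
--         for j in range(width):
--             if matrix[i][j]==1:
--                 re[i][j]=0
--                 queue.append((i,j))
--             else:
--                 re[i][j]=-1
--     while queue:
--         x,y=queue.popleft()
--         for d in direction:
--             x1=x+d[0]
--             y1=y+d[1]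
--             if x1>=0 and y1>=0 and x1<length and y1<width and re[x1][y1]==-1:
--                 re[x1][y1]=re[x][y]+1
--                 queue.append((x1,y1))
--     return re
-- ===== SOURCE B (Python) =====
-- def land(matrix):
--     length = len(matrix)
--     width = len(matrix[0])
--     lands = [(i, j) for i in range(length) for j in range(width) if matrix[i][j] == 1]
--     return [[min((abs(i - a) + abs(j - b) for a, b in lands), default=-1)
--              for j in range(width)] for i in range(length)]
-- ===== Notes on version B (the rewrite author's own statement) =====
-- stated objective: simpler
-- what changed: Replaces the multi-source BFS with a mutable grid and deque by a direct closed-form computation: collect the land cells once and return, for each cell, the minimum Manhattan distance to any land cell (default -1), which equals the BFS distance because the grid has no obstacles.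
import Mathlib
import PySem

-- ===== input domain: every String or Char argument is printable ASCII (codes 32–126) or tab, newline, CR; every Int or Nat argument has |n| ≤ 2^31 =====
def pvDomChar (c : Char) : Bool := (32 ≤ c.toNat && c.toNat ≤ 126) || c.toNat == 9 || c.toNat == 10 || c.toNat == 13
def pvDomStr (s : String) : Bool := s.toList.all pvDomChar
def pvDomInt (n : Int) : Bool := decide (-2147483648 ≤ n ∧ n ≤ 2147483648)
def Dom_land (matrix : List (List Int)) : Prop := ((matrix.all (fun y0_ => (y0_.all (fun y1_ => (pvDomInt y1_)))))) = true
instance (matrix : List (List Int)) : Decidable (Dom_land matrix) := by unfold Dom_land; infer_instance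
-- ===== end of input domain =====

-- B replaces A's multi-source BFS (mutable grid + deque) by a direct computation: for each cell the
-- minimum Manhattan distance to any land cell (default -1); equal values, no speed claim (objective: simpler).

-- ===== PORT A =====
-- re[x][y] read (indices are in range wherever the ports use this)
def pvGetCell (re : List (List Int)) (x y : Int) : Int := (re.getD x.toNat []).getD y.toNat 0

-- re[x][y] = v
def pvSetCell (re : List (List Int)) (x y : Nat) (v : Int) : List (List Int) :=
  re.set x ((re.getD x []).set y v)

def pvDirs : List (Int × Int) := [(1, 0), (-1, 0), (0, 1), (0, -1)]

-- body of A's init double loop: one cell (i, j)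
def pvInitStep (m : List (List Int)) (st : List (List Int) × List (Int × Int)) (i j : Nat) :
    List (List Int) × List (Int × Int) :=
  if (m.getD i []).getD j 0 = 1 then (pvSetCell st.1 i j 0, st.2 ++ [((i : Int), (j : Int))])
  else (pvSetCell st.1 i j (-1), st.2)

-- A's init double loop over the zero grid, building re and the queue
def pvInit (m : List (List Int)) (L W : Nat) : List (List Int) × List (Int × Int) :=
  (List.range L).foldl
    (fun st i => (List.range W).foldl (fun st2 j => pvInitStep m st2 i j) st)
    (List.replicate L (List.replicate W 0), [])

-- body of A's `for d in direction` loop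
def pvStep (L W : Nat) (x y : Int) (st : List (List Int) × List (Int × Int)) (dxy : Int × Int) :
    List (List Int) × List (Int × Int) :=
  let x1 := x + dxy.1
  let y1 := y + dxy.2
  if 0 ≤ x1 ∧ 0 ≤ y1 ∧ x1 < (L : Int) ∧ y1 < (W : Int) ∧ pvGetCell st.1 x1 y1 = -1 then
    (pvSetCell st.1 x1.toNat y1.toNat (pvGetCell st.1 x y + 1), st.2 ++ [(x1, y1)])
  else st

-- A's `while queue:` loop; the fuel only makes it total (2*L*W is proved sufficient below)
def pvBfs (L W : Nat) : Nat → (List (List Int) × List (Int × Int)) → List (List Int)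
  | 0, st => st.1
  | fuel + 1, st =>
    match st.2 with
    | [] => st.1
    | (x, y) :: rest => pvBfs L W fuel (pvDirs.foldl (pvStep L W x y) (st.1, rest))

def land (matrix : List (List Int)) : List (List Int) :=
  let length := matrix.length
  let width := ((PySem.List.pyGet? matrix 0).getD []).length
  pvBfs length width (2 * length * width) (pvInit matrix length width)

-- ===== PORT B =====
def pvManh (c s : Int × Int) : Int := |c.1 - s.1| + |c.2 - s.2|

-- min((abs(i-a)+abs(j-b) for a, b in lands), default=-1)
def pvD (S : List (Int × Int)) (c : Int × Int) : Int :=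
  PySem.List.minD (S.map (fun s => pvManh c s)) (fun x => x) (-1)

-- [(i, j) for i in range(length) for j in range(width) if matrix[i][j] == 1]
def pvLands (m : List (List Int)) (L W : Nat) : List (Int × Int) :=
  (List.range L).flatMap (fun (i : Nat) =>
    (List.range W).filterMap (fun (j : Nat) =>
      if (m.getD i []).getD j 0 = 1 then some ((i : Int), (j : Int)) else none))

def land_alt (matrix : List (List Int)) : List (List Int) :=
  let length := matrix.length
  let width := ((PySem.List.pyGet? matrix 0).getD []).length
  let lands := pvLands matrix length width
  (List.range length).map (fun (i : Nat) =>
    (List.range width).map (fun (j : Nat) => pvD lands ((i : Int), (j : Int))))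

-- ===== PRECONDITION & SPEC =====
-- Pre_ excludes exactly the inputs where A raises: the empty matrix (IndexError on matrix[0]) and
-- matrices with a row shorter than the first row (IndexError on matrix[i][j]); B raises there too.
def Pre_land (matrix : List (List Int)) : Prop :=
  matrix ≠ [] ∧ ∀ row ∈ matrix, (matrix.headD []).length ≤ row.length
instance (matrix : List (List Int)) : Decidable (Pre_land matrix) := by unfold Pre_land; infer_instance
def pvWitness_land : List (List Int) := [[1, 0], [0, 0]]

def Spec_land (matrix : List (List Int)) (out : List (List Int)) : Prop := out = land_alt matrix
instance (matrix : List (List Int)) (out : List (List Int)) : Decidable (Spec_land matrix out) := by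
  unfold Spec_land; infer_instance

-- ===== CLAIM (what is proved, stated in full; the proofs are below) =====
def Claim_equal_land : Prop :=
  ∀ (matrix : List (List Int)), Dom_land matrix → Pre_land matrix → Spec_land matrix (land matrix)

-- ===== LEMMAS AND PROOFS =====

-- valid grid coordinates
abbrev pvValid (L W : Nat) (c : Int × Int) : Prop :=
  0 ≤ c.1 ∧ c.1 < (L : Int) ∧ 0 ≤ c.2 ∧ c.2 < (W : Int)

def pvAll (L W : Nat) : List (Int × Int) :=
  (List.range L).flatMap (fun (i : Nat) => (List.range W).map (fun (j : Nat) => ((i : Int), (j : Int))))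

def pvU (L W : Nat) (re : List (List Int)) : Nat :=
  (pvAll L W).countP (fun c => pvGetCell re c.1 c.2 == -1)

def pvDims (L W : Nat) (re : List (List Int)) : Prop :=
  re.length = L ∧ ∀ row ∈ re, row.length = W

def pvMval (m : List (List Int)) (c : Int × Int) : Int :=
  (m.getD c.1.toNat []).getD c.2.toNat 0

-- the BFS loop invariant
structure PvInv (L W : Nat) (S : List (Int × Int)) (st : List (List Int) × List (Int × Int)) : Prop where
  dims : pvDims L W st.1
  src : ∀ s ∈ S, pvGetCell st.1 s.1 s.2 ≠ -1
  aval : ∀ c : Int × Int, pvValid L W c → pvGetCell st.1 c.1 c.2 ≠ -1 →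
    pvGetCell st.1 c.1 c.2 = pvD S c
  qvalid : ∀ q ∈ st.2, pvValid L W q
  qassigned : ∀ q ∈ st.2, pvGetCell st.1 q.1 q.2 ≠ -1
  qnodup : st.2.Nodup
  qsorted : st.2.Pairwise (fun a b => pvD S a ≤ pvD S b)
  qbound : ∀ q rest, st.2 = q :: rest → ∀ e ∈ st.2, pvD S e ≤ pvD S q + 1
  qfrontier : ∀ q rest, st.2 = q :: rest → ∀ c : Int × Int, pvValid L W c →
    pvD S c ≤ pvD S q → pvGetCell st.1 c.1 c.2 ≠ -1
  done : ∀ c : Int × Int, pvValid L W c → pvGetCell st.1 c.1 c.2 ≠ -1 → c ∉ st.2 →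
    ∀ dxy ∈ pvDirs, pvValid L W (c.1 + dxy.1, c.2 + dxy.2) →
      pvGetCell st.1 (c.1 + dxy.1) (c.2 + dxy.2) ≠ -1

-- ---- grid access lemmas ----
lemma pvGetD_set_self {α : Type} (l : List α) (i : Nat) (v d : α) (h : i < l.length) :
    (l.set i v).getD i d = v := by
  rw [List.getD_eq_getElem?_getD, List.getElem?_set_self (by simpa using h)]; rfl

lemma pvGetD_set_ne {α : Type} (l : List α) {i j : Nat} (v d : α) (h : i ≠ j) :
    (l.set i v).getD j d = l.getD j d := by
  rw [List.getD_eq_getElem?_getD, List.getElem?_set_ne h, ← List.getD_eq_getElem?_getD]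

lemma pvGet_set_same {L W : Nat} {re : List (List Int)} (hd : pvDims L W re)
    {c : Int × Int} (hv : pvValid L W c) (v : Int) :
    pvGetCell (pvSetCell re c.1.toNat c.2.toNat v) c.1 c.2 = v := by
  obtain ⟨h1, h2, h3, h4⟩ := hv
  obtain ⟨hL, hW⟩ := hd
  have hx : c.1.toNat < re.length := by omega
  have hy : c.2.toNat < (re.getD c.1.toNat []).length := by
    rw [List.getD_eq_getElem re [] hx]
    have := hW _ (List.getElem_mem hx); omega
  unfold pvGetCell pvSetCell
  rw [pvGetD_set_self _ _ _ _ hx, pvGetD_set_self _ _ _ _ hy]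

lemma pvGet_set_other {L W : Nat} {re : List (List Int)} (hd : pvDims L W re)
    {c : Int × Int} (hv : pvValid L W c) {c' : Int × Int} (h1 : 0 ≤ c'.1) (h2 : 0 ≤ c'.2)
    (hne : c' ≠ c) (v : Int) :
    pvGetCell (pvSetCell re c.1.toNat c.2.toNat v) c'.1 c'.2 = pvGetCell re c'.1 c'.2 := by
  obtain ⟨g1, g2, g3, g4⟩ := hv
  obtain ⟨hL, hW⟩ := hd
  have hx : c.1.toNat < re.length := by omega
  unfold pvGetCell pvSetCell
  by_cases hr : c'.1 = c.1
  · have hcol : c'.2 ≠ c.2 := fun h => hne (Prod.ext hr h)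
    rw [hr, pvGetD_set_self _ _ _ _ hx, pvGetD_set_ne _ _ _ (by omega)]
  · rw [pvGetD_set_ne _ _ _ (by omega)]

lemma pvDims_set {L W : Nat} {re : List (List Int)} (hd : pvDims L W re)
    {c : Int × Int} (hv : pvValid L W c) (v : Int) :
    pvDims L W (pvSetCell re c.1.toNat c.2.toNat v) := by
  obtain ⟨h1, h2, h3, h4⟩ := hv
  obtain ⟨hL, hW⟩ := hd
  have hx : c.1.toNat < re.length := by omega
  refine ⟨by simpa [pvSetCell] using hL, ?_⟩
  intro row hrow
  rcases List.mem_or_eq_of_mem_set hrow with h | h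
  · exact hW _ h
  · subst h
    rw [List.length_set]
    exact hW _ (List.getD_eq_getElem re [] hx ▸ List.getElem_mem hx)

-- ---- pvAll ----
lemma mem_pvAll {L W : Nat} {c : Int × Int} : c ∈ pvAll L W ↔ pvValid L W c := by
  constructor
  · intro h
    obtain ⟨i, hi, hmem⟩ := List.mem_flatMap.mp h
    obtain ⟨j, hj, hc⟩ := List.mem_map.mp hmem
    rw [List.mem_range] at hi hj
    subst hc
    refine ⟨by simp, by simpa using hi, by simp, by simpa using hj⟩
  · rintro ⟨h1, h2, h3, h4⟩
    refine List.mem_flatMap.mpr ⟨c.1.toNat, List.mem_range.mpr (by omega), ?_⟩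
    refine List.mem_map.mpr ⟨c.2.toNat, List.mem_range.mpr (by omega), ?_⟩
    ext <;> simp <;> omega

lemma nodup_pvAll {L W : Nat} : (pvAll L W).Nodup := by
  rw [pvAll, List.nodup_flatMap]
  constructor
  · intro i _
    exact (List.nodup_range).map (fun a b h => by have := congrArg Prod.snd h; simpa using this)
  · refine List.Pairwise.imp ?_ (List.pairwise_lt_range)
    intro a b hab x hx hy
    obtain ⟨j, _, rfl⟩ := List.mem_map.mp hx
    obtain ⟨k, _, hk⟩ := List.mem_map.mp hy
    have := congrArg Prod.fst hk
    simp at this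
    omega

lemma length_pvAll {L W : Nat} : (pvAll L W).length = L * W := by
  simp [pvAll]

-- ---- counting ----
lemma countP_flip {α : Type} {l : List α} (hl : l.Nodup) {c : α} (hc : c ∈ l)
    {p q : α → Bool} (hpc : p c = true) (hqc : q c = false)
    (hother : ∀ a ∈ l, a ≠ c → q a = p a) : l.countP q + 1 = l.countP p := by
  induction l with
  | nil => simp at hc
  | cons a t ih =>
    rcases List.mem_cons.mp hc with rfl | hct
    · have hnt : c ∉ t := (List.nodup_cons.mp hl).1
      have : t.countP q = t.countP p := List.countP_congr (fun x hx => by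
        rw [hother x (List.mem_cons_of_mem _ hx) (fun h => hnt (h ▸ hx))])
      simp [hpc, hqc, this]
    · have hac : a ≠ c := fun h => ((List.nodup_cons.mp hl).1 (h ▸ hct))
      have hq := hother a (List.mem_cons_self) hac
      have := ih (List.nodup_cons.mp hl).2 hct (fun x hx hxc => hother x (List.mem_cons_of_mem _ hx) hxc)
      simp only [List.countP_cons, hq]
      omega

-- ---- distance lemmas ----
lemma pvManh_nonneg (c s : Int × Int) : 0 ≤ pvManh c s := by
  unfold pvManh; positivity

lemma pvManh_self (c : Int × Int) : pvManh c c = 0 := by simp [pvManh]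

lemma pvManh_eq_zero {c s : Int × Int} (h : pvManh c s = 0) : c = s := by
  unfold pvManh at h
  have h1 : |c.1 - s.1| = 0 ∧ |c.2 - s.2| = 0 := by
    constructor <;> nlinarith [abs_nonneg (c.1 - s.1), abs_nonneg (c.2 - s.2)]
  have := abs_eq_zero.mp h1.1; have := abs_eq_zero.mp h1.2
  exact Prod.ext (by omega) (by omega)

lemma pvManh_triangle (a b c : Int × Int) : pvManh a c ≤ pvManh a b + pvManh b c := by
  unfold pvManh
  have := abs_add_le (a.1 - b.1) (b.1 - c.1)
  have := abs_add_le (a.2 - b.2) (b.2 - c.2)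
  have e1 : a.1 - c.1 = (a.1 - b.1) + (b.1 - c.1) := by ring
  have e2 : a.2 - c.2 = (a.2 - b.2) + (b.2 - c.2) := by ring
  rw [e1, e2]; omega

lemma pvD_nil (c : Int × Int) : pvD [] c = -1 := rfl

lemma pvD_le {S : List (Int × Int)} {s : Int × Int} (hs : s ∈ S) (c : Int × Int) :
    pvD S c ≤ pvManh c s := by
  unfold pvD PySem.List.minD
  rcases hm : PySem.List.min? (S.map (fun s => pvManh c s)) (fun x => x) with _ | m
  · rw [PySem.List.min?_eq_none_iff] at hm
    simp at hm; subst hm; simp at hs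
  · have := PySem.List.min?_isMin hm (pvManh c s) (List.mem_map_of_mem hs)
    simpa using this

lemma pvD_realize {S : List (Int × Int)} (hS : S ≠ []) (c : Int × Int) :
    ∃ s ∈ S, pvD S c = pvManh c s := by
  unfold pvD PySem.List.minD
  rcases hm : PySem.List.min? (S.map (fun s => pvManh c s)) (fun x => x) with _ | m
  · rw [PySem.List.min?_eq_none_iff] at hm
    simp at hm; exact absurd hm hS
  · have := PySem.List.min?_mem hm
    obtain ⟨s, hs, he⟩ := List.mem_map.mp this
    exact ⟨s, hs, by simp [he]⟩

lemma pvD_nonneg {S : List (Int × Int)} (hS : S ≠ []) (c : Int × Int) : 0 ≤ pvD S c := by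
  obtain ⟨s, _, h⟩ := pvD_realize hS c
  exact h ▸ pvManh_nonneg c s

lemma pvD_zero_of_mem {S : List (Int × Int)} {c : Int × Int} (hc : c ∈ S) : pvD S c = 0 := by
  have h1 := pvD_le hc c
  have h2 := pvD_nonneg (List.ne_nil_of_mem hc) c
  rw [pvManh_self] at h1; omega

lemma mem_of_pvD_zero {S : List (Int × Int)} (hS : S ≠ []) {c : Int × Int}
    (h : pvD S c = 0) : c ∈ S := by
  obtain ⟨s, hs, he⟩ := pvD_realize hS c
  have : c = s := pvManh_eq_zero (by omega)
  exact this ▸ hs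

lemma pvD_lipschitz {S : List (Int × Int)} (hS : S ≠ []) (c c' : Int × Int) :
    pvD S c ≤ pvD S c' + pvManh c c' := by
  obtain ⟨s, hs, he⟩ := pvD_realize hS c'
  have h1 := pvD_le hs c
  have h2 := pvManh_triangle c c' s
  omega

lemma pvManh_dir {c : Int × Int} {dxy : Int × Int} (hd : dxy ∈ pvDirs) :
    pvManh (c.1 + dxy.1, c.2 + dxy.2) c = 1 := by
  fin_cases hd <;> simp [pvManh]

lemma pvDirs_neg {dxy : Int × Int} (hd : dxy ∈ pvDirs) : (-dxy.1, -dxy.2) ∈ pvDirs := by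
  fin_cases hd <;> simp [pvDirs]

lemma pvManh_comm (c s : Int × Int) : pvManh c s = pvManh s c := by
  unfold pvManh; rw [abs_sub_comm, abs_sub_comm c.2]

lemma pvAbs_step {a b : Int} (h : a ≠ b) :
    |a + (if a < b then 1 else -1) - b| = |a - b| - 1 := by
  rcases lt_or_gt_of_ne h with hlt | hgt
  · rw [if_pos hlt, abs_of_nonpos (by omega), abs_of_nonpos (by omega)]; ring
  · rw [if_neg (by omega), abs_of_nonneg (by omega), abs_of_nonneg (by omega)]; ring

-- a neighbor one step along a geodesic: pvD drops by exactly 1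
lemma pvD_step {L W : Nat} {S : List (Int × Int)} (hS : S ≠ [])
    (hSv : ∀ s ∈ S, pvValid L W s) {c : Int × Int} (hc : pvValid L W c)
    (h1 : 1 ≤ pvD S c) :
    ∃ dxy ∈ pvDirs, pvValid L W (c.1 + dxy.1, c.2 + dxy.2) ∧
      pvD S (c.1 + dxy.1, c.2 + dxy.2) = pvD S c - 1 := by
  obtain ⟨s, hsS, he⟩ := pvD_realize hS c
  obtain ⟨v1, v2, v3, v4⟩ := hSv s hsS
  obtain ⟨u1, u2, u3, u4⟩ := hc
  have hne : c.1 ≠ s.1 ∨ (c.1 = s.1 ∧ c.2 ≠ s.2) := by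
    by_cases h : c.1 = s.1
    · refine Or.inr ⟨h, fun h2 => ?_⟩
      rw [he] at h1; unfold pvManh at h1; rw [h, h2] at h1; simp at h1
    · exact Or.inl h
  have key : ∀ dxy ∈ pvDirs, pvValid L W (c.1 + dxy.1, c.2 + dxy.2) →
      pvManh (c.1 + dxy.1, c.2 + dxy.2) s = pvManh c s - 1 →
      pvD S (c.1 + dxy.1, c.2 + dxy.2) = pvD S c - 1 := by
    intro dxy hd _ hm
    have hle := pvD_le hsS (c.1 + dxy.1, c.2 + dxy.2)
    rw [hm, ← he] at hle
    have hlip := pvD_lipschitz hS c (c.1 + dxy.1, c.2 + dxy.2)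
    rw [pvManh_comm, pvManh_dir hd] at hlip
    omega
  rcases hne with h | ⟨hx, h⟩
  · refine ⟨(if c.1 < s.1 then 1 else -1, 0), by split_ifs <;> simp [pvDirs], ?_, ?_⟩
    · refine ⟨by split_ifs <;> omega, by split_ifs <;> omega, by simpa using u3, by simpa using u4⟩
    · apply key _ (by split_ifs <;> simp [pvDirs])
      · refine ⟨by split_ifs <;> omega, by split_ifs <;> omega, by simpa using u3, by simpa using u4⟩
      · show |c.1 + _ - s.1| + |c.2 + 0 - s.2| = _
        simp only [add_zero]
        unfold pvManh
        rw [pvAbs_step h]; ring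
  · refine ⟨(0, if c.2 < s.2 then 1 else -1), by split_ifs <;> simp [pvDirs], ?_, ?_⟩
    · refine ⟨by simpa using u1, by simpa using u2, by split_ifs <;> omega, by split_ifs <;> omega⟩
    · apply key _ (by split_ifs <;> simp [pvDirs])
      · refine ⟨by simpa using u1, by simpa using u2, by split_ifs <;> omega, by split_ifs <;> omega⟩
      · show |c.1 + 0 - s.1| + |c.2 + _ - s.2| = _
        simp only [add_zero]
        unfold pvManh
        rw [pvAbs_step h]; ring

-- ---- the 4-direction fold, characterized ----
def pvTarget (x y : Int) (ds : List (Int × Int)) (c : Int × Int) : Prop :=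
  ∃ dxy ∈ ds, c = (x + dxy.1, y + dxy.2)

lemma pvFold_char {L W : Nat} {x y : Int} {ds : List (Int × Int)}
    (hnd : ds.Nodup) (hnz : ∀ d ∈ ds, d ≠ ((0 : Int), (0 : Int)))
    {st : List (List Int) × List (Int × Int)} (hd : pvDims L W st.1)
    (hx : 0 ≤ x) (hy : 0 ≤ y) :
    pvDims L W (ds.foldl (pvStep L W x y) st).1
    ∧ (∀ c : Int × Int, 0 ≤ c.1 → 0 ≤ c.2 →
        ¬(pvTarget x y ds c ∧ pvValid L W c ∧ pvGetCell st.1 c.1 c.2 = -1) →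
        pvGetCell (ds.foldl (pvStep L W x y) st).1 c.1 c.2 = pvGetCell st.1 c.1 c.2)
    ∧ (∀ c : Int × Int, pvTarget x y ds c → pvValid L W c → pvGetCell st.1 c.1 c.2 = -1 →
        pvGetCell (ds.foldl (pvStep L W x y) st).1 c.1 c.2 = pvGetCell st.1 x y + 1)
    ∧ (ds.foldl (pvStep L W x y) st).2 = st.2 ++ ds.filterMap (fun dxy =>
        if pvValid L W (x + dxy.1, y + dxy.2) ∧ pvGetCell st.1 (x + dxy.1) (y + dxy.2) = -1
        then some (x + dxy.1, y + dxy.2) else none)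
    ∧ (0 ≤ pvGetCell st.1 x y →
        2 * pvU L W (ds.foldl (pvStep L W x y) st).1 + (ds.foldl (pvStep L W x y) st).2.length
          ≤ 2 * pvU L W st.1 + st.2.length) := by
  induction ds generalizing st with
  | nil =>
    refine ⟨hd, fun c _ _ _ => rfl, fun c hT => absurd hT (by simp [pvTarget]), by simp, fun _ => le_refl _⟩
  | cons d t ih =>
    have hnd' : t.Nodup := (List.nodup_cons.mp hnd).2
    have hdt : d ∉ t := (List.nodup_cons.mp hnd).1
    have hnz' : ∀ d' ∈ t, d' ≠ ((0 : Int), (0 : Int)) := fun d' h => hnz d' (List.mem_cons_of_mem _ h)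
    have hdnz : d ≠ ((0 : Int), (0 : Int)) := hnz d List.mem_cons_self
    set c0 : Int × Int := (x + d.1, y + d.2) with hc0
    have hc0q : c0 ≠ (x, y) := by
      intro h
      apply hdnz
      have h1 := congrArg Prod.fst h; have h2 := congrArg Prod.snd h
      simp [hc0] at h1 h2
      exact Prod.ext (by simpa using h1) (by simpa using h2)
    have htgt_ne : ∀ d' ∈ t, ((x + d'.1, y + d'.2) : Int × Int) ≠ c0 := by
      intro d' hd' h
      apply hdt
      have h1 := congrArg Prod.fst h; have h2 := congrArg Prod.snd h
      simp [hc0] at h1 h2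
      rwa [show d' = d from Prod.ext (by omega) (by omega)] at hd'
    have hfold : (d :: t).foldl (pvStep L W x y) st = t.foldl (pvStep L W x y) (pvStep L W x y st d) := rfl
    by_cases hcond : pvValid L W c0 ∧ pvGetCell st.1 c0.1 c0.2 = -1
    · -- the first direction writes
      have hstep : pvStep L W x y st d =
          (pvSetCell st.1 c0.1.toNat c0.2.toNat (pvGetCell st.1 x y + 1), st.2 ++ [c0]) := by
        unfold pvStep
        rw [if_pos]
        obtain ⟨⟨a1, a2, a3, a4⟩, a5⟩ := hcond
        exact ⟨a1, a3, a2, a4, a5⟩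
      set st1 := pvStep L W x y st d with hst1
      have hd1 : pvDims L W st1.1 := by rw [hstep]; exact pvDims_set hd hcond.1 _
      have hval1_other : ∀ c : Int × Int, 0 ≤ c.1 → 0 ≤ c.2 → c ≠ c0 →
          pvGetCell st1.1 c.1 c.2 = pvGetCell st.1 c.1 c.2 := by
        intro c n1 n2 hne
        rw [hstep]
        exact pvGet_set_other hd hcond.1 n1 n2 hne _
      have hval1_c0 : pvGetCell st1.1 c0.1 c0.2 = pvGetCell st.1 x y + 1 := by
        rw [hstep]; exact pvGet_set_same hd hcond.1 _
      have hxyv : pvGetCell st1.1 x y = pvGetCell st.1 x y :=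
        hval1_other (x, y) hx hy (Ne.symm hc0q)
      obtain ⟨ih1, ih2, ih3, ih4, ih5⟩ := ih hnd' hnz' hd1
      refine ⟨by rwa [hfold], ?_, ?_, ?_, ?_⟩
      · -- unchanged cells
        intro c n1 n2 hnc
        rw [hfold]
        have hne : c ≠ c0 := by
          rintro rfl
          exact hnc ⟨⟨d, List.mem_cons_self, rfl⟩, hcond.1, hcond.2⟩
        rw [ih2 c n1 n2, hval1_other c n1 n2 hne]
        intro ⟨hT, hV, hm1⟩
        rw [hval1_other c n1 n2 hne] at hm1
        exact hnc ⟨⟨hT.choose, List.mem_cons_of_mem _ hT.choose_spec.1, hT.choose_spec.2⟩, hV, hm1⟩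
      · -- written cells
        intro c hT hV hm1
        rw [hfold]
        rcases hT with ⟨d', hd', rfl⟩
        rcases List.mem_cons.mp hd' with rfl | hd't
        · -- c is the first target c0
          have hnoT : ¬ pvTarget x y t c0 := by
            rintro ⟨d'', hd'', he⟩
            exact htgt_ne d'' hd'' he.symm
          rw [ih2 c0 (by exact hcond.1.1) (by exact hcond.1.2.2.1) (fun h => hnoT h.1),
            hval1_c0]
        · -- c is a later target
          have hne : ((x + d'.1, y + d'.2) : Int × Int) ≠ c0 := htgt_ne d' hd't
          have n1 : (0:Int) ≤ x + d'.1 := hV.1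
          have n2 : (0:Int) ≤ y + d'.2 := hV.2.2.1
          rw [ih3 _ ⟨d', hd't, rfl⟩ hV (by rw [hval1_other _ n1 n2 hne]; exact hm1), hxyv]
      · -- the queue
        have hq1 : st1.2 = st.2 ++ [c0] := by rw [hstep]
        rw [hfold, ih4, hq1]
        simp only [List.filterMap_cons]
        rw [if_pos (by exact ⟨hcond.1, hcond.2⟩)]
        rw [List.append_assoc]
        congr 1
        rw [List.singleton_append]
        congr 1
        apply List.filterMap_congr
        intro d' hd'
        have hv' : pvGetCell st1.1 (x + d'.1) (y + d'.2) = pvGetCell st.1 (x + d'.1) (y + d'.2) ∨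
            ¬ pvValid L W ((x + d'.1, y + d'.2) : Int × Int) := by
          by_cases hvv : pvValid L W ((x + d'.1, y + d'.2) : Int × Int)
          · exact Or.inl (hval1_other _ hvv.1 hvv.2.2.1 (htgt_ne d' hd'))
          · exact Or.inr hvv
        rcases hv' with h | h
        · rw [h]
        · rw [if_neg (fun hx2 => h hx2.1), if_neg (fun hx2 => h hx2.1)]
      · -- the measure
        intro hv0
        rw [hfold]
        have hU : pvU L W st1.1 + 1 = pvU L W st.1 := by
          apply countP_flip nodup_pvAll (mem_pvAll.mpr hcond.1)
          · simp [hcond.2]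
          · simp [hval1_c0]; omega
          · intro a ha hne
            simp only [hval1_other a (mem_pvAll.mp ha).1 (mem_pvAll.mp ha).2.2.1 hne]
        have hQ : st1.2.length = st.2.length + 1 := by rw [hstep]; simp
        have := ih5 (by rwa [hxyv])
        omega
    · -- the first direction does not write
      have hstep : pvStep L W x y st d = st := by
        unfold pvStep
        rw [if_neg]
        intro ⟨a1, a2, a3, a4, a5⟩
        exact hcond ⟨⟨a1, a3, a2, a4⟩, a5⟩
      obtain ⟨ih1, ih2, ih3, ih4, ih5⟩ := ih hnd' hnz' (st := st) hd
      rw [hfold, hstep]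
      refine ⟨ih1, ?_, ?_, ?_, ih5⟩
      · intro c n1 n2 hnc
        apply ih2 c n1 n2
        intro ⟨hT, hV, hm1⟩
        exact hnc ⟨⟨hT.choose, List.mem_cons_of_mem _ hT.choose_spec.1, hT.choose_spec.2⟩, hV, hm1⟩
      · intro c hT hV hm1
        rcases hT with ⟨d', hd', rfl⟩
        rcases List.mem_cons.mp hd' with rfl | hd't
        · exact absurd ⟨hV, hm1⟩ hcond
        · exact ih3 _ ⟨d', hd't, rfl⟩ hV hm1
      · rw [ih4]
        simp only [List.filterMap_cons]
        rw [if_neg (fun hx2 => hcond ⟨hx2.1, hx2.2⟩)]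

-- ---- invariant maintenance ----
lemma pvInv_maintain {L W : Nat} {S : List (Int × Int)} (hS : S ≠ [])
    (hSv : ∀ s ∈ S, pvValid L W s)
    {re : List (List Int)} {x y : Int} {rest : List (Int × Int)}
    (hinv : PvInv L W S (re, (x, y) :: rest)) :
    PvInv L W S (pvDirs.foldl (pvStep L W x y) (re, rest))
    ∧ 2 * pvU L W (pvDirs.foldl (pvStep L W x y) (re, rest)).1
        + (pvDirs.foldl (pvStep L W x y) (re, rest)).2.length + 1
      ≤ 2 * pvU L W re + ((x, y) :: rest).length := by
  have hqv : pvValid L W ((x, y) : Int × Int) := hinv.qvalid _ List.mem_cons_self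
  have hx : (0:Int) ≤ x := hqv.1
  have hy : (0:Int) ≤ y := hqv.2.2.1
  have hqa : pvGetCell re x y ≠ -1 := hinv.qassigned _ List.mem_cons_self
  have hvd : pvGetCell re x y = pvD S ((x, y) : Int × Int) := hinv.aval _ hqv hqa
  have hv0 : (0:Int) ≤ pvGetCell re x y := hvd ▸ pvD_nonneg hS _
  have hDnodup : pvDirs.Nodup := by decide
  have hDnz : ∀ d ∈ pvDirs, d ≠ ((0:Int), (0:Int)) := by decide
  obtain ⟨F1, F2, F3, F4, F5⟩ :=
    pvFold_char (st := ((re, rest) : List (List Int) × List (Int × Int))) hDnodup hDnz hinv.dims hx hy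
  set r := pvDirs.foldl (pvStep L W x y) ((re, rest) : List (List Int) × List (Int × Int)) with hrdef
  set news := pvDirs.filterMap (fun dxy =>
      if pvValid L W ((x + dxy.1, y + dxy.2) : Int × Int) ∧
          pvGetCell re (x + dxy.1) (y + dxy.2) = -1
      then some ((x + dxy.1, y + dxy.2) : Int × Int) else none) with hnewsdef
  have n_mem : ∀ c : Int × Int,
      c ∈ news ↔ (pvTarget x y pvDirs c ∧ pvValid L W c ∧ pvGetCell re c.1 c.2 = -1) := by
    intro c
    rw [hnewsdef, List.mem_filterMap]
    constructor
    · rintro ⟨dxy, hdm, hsome⟩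
      split_ifs at hsome with hcnd
      · obtain rfl := (Option.some.inj hsome).symm
        exact ⟨⟨dxy, hdm, rfl⟩, hcnd.1, hcnd.2⟩
    · rintro ⟨⟨dxy, hdm, rfl⟩, hV, hm⟩
      exact ⟨dxy, hdm, by rw [if_pos ⟨hV, hm⟩]⟩
  have n_val : ∀ c ∈ news, pvGetCell r.1 c.1 c.2 = pvGetCell re x y + 1 := by
    intro c hc
    obtain ⟨hT, hV, hm⟩ := (n_mem c).mp hc
    exact F3 c hT hV hm
  have n_assigned : ∀ c ∈ news, pvGetCell r.1 c.1 c.2 ≠ -1 := by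
    intro c hc; rw [n_val c hc]; omega
  have manh_q : ∀ c : Int × Int, pvTarget x y pvDirs c → pvManh c (x, y) = 1 := by
    rintro c ⟨dxy, hdm, rfl⟩
    simpa using pvManh_dir (c := ((x, y) : Int × Int)) hdm
  have n_d : ∀ c ∈ news, pvD S c = pvGetCell re x y + 1 := by
    intro c hc
    obtain ⟨hT, hV, hm⟩ := (n_mem c).mp hc
    have h1 : pvD S c ≤ pvD S ((x, y) : Int × Int) + 1 := by
      have := pvD_lipschitz hS c (x, y)
      rw [manh_q c hT] at this; omega
    have h2 : ¬ pvD S c ≤ pvD S ((x, y) : Int × Int) := fun hle =>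
      (hinv.qfrontier (x, y) rest rfl c hV hle) hm
    omega
  have unchanged : ∀ c : Int × Int, 0 ≤ c.1 → 0 ≤ c.2 → pvGetCell re c.1 c.2 ≠ -1 →
      pvGetCell r.1 c.1 c.2 = pvGetCell re c.1 c.2 := by
    intro c n1 n2 hm
    exact F2 c n1 n2 (fun h => hm h.2.2)
  have aup : ∀ c : Int × Int, 0 ≤ c.1 → 0 ≤ c.2 → pvGetCell re c.1 c.2 ≠ -1 →
      pvGetCell r.1 c.1 c.2 ≠ -1 := by
    intro c n1 n2 hm
    rw [unchanged c n1 n2 hm]; exact hm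
  have adown : ∀ c : Int × Int, pvValid L W c → pvGetCell r.1 c.1 c.2 ≠ -1 →
      pvGetCell re c.1 c.2 ≠ -1 ∨ c ∈ news := by
    intro c hV ha
    by_cases hm : pvGetCell re c.1 c.2 = -1
    · by_cases hT : pvTarget x y pvDirs c
      · exact Or.inr ((n_mem c).mpr ⟨hT, hV, hm⟩)
      · rw [F2 c hV.1 hV.2.2.1 (fun h => hT h.1)] at ha
        exact absurd hm ha
    · exact Or.inl hm
  have hrest_ge : ∀ e ∈ rest, pvD S ((x, y) : Int × Int) ≤ pvD S e := by
    have h := hinv.qsorted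
    rw [List.pairwise_cons] at h
    exact h.1
  have hall_le : ∀ e ∈ ((x, y) :: rest : List (Int × Int)),
      pvD S e ≤ pvD S ((x, y) : Int × Int) + 1 := by
    have h := hinv.qbound (x, y) rest rfl
    intro e he
    have := h e he
    omega
  have hqvalid' : ∀ e ∈ rest ++ news, pvValid L W e := by
    intro e he
    rcases List.mem_append.mp he with h | h
    · exact hinv.qvalid e (List.mem_cons_of_mem _ h)
    · exact ((n_mem e).mp h).2.1
  have hqassigned' : ∀ e ∈ rest ++ news, pvGetCell r.1 e.1 e.2 ≠ -1 := by
    intro e he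
    rcases List.mem_append.mp he with h | h
    · have hV := hinv.qvalid e (List.mem_cons_of_mem _ h)
      exact aup e hV.1 hV.2.2.1 (hinv.qassigned e (List.mem_cons_of_mem _ h))
    · exact n_assigned e h
  have hnodup' : (rest ++ news).Nodup := by
    rw [List.nodup_append]
    refine ⟨(List.nodup_cons.mp hinv.qnodup).2, ?_, ?_⟩
    · refine List.Nodup.filterMap ?_ hDnodup
      intro a b c hca hcb
      split_ifs at hca hcb
      · cases Option.some.inj hca
        have h1 := congrArg Prod.fst (Option.some.inj hcb)
        have h2 := congrArg Prod.snd (Option.some.inj hcb)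
        simp at h1 h2
        exact Prod.ext (by omega) (by omega)
      · simp at hcb
      · simp at hca
      · simp at hca
    · intro e he f hf heq
      exact (hinv.qassigned e (List.mem_cons_of_mem _ he))
        (heq ▸ ((n_mem f).mp hf).2.2)
  have hsorted' : (rest ++ news).Pairwise (fun a b => pvD S a ≤ pvD S b) := by
    rw [List.pairwise_append]
    refine ⟨(List.pairwise_cons.mp hinv.qsorted).2, ?_, ?_⟩
    · exact List.pairwise_of_forall_mem_list (fun a ha b hb => by
        rw [n_d a ha, n_d b hb])
    · intro a ha b hb
      have h1 := hall_le a (List.mem_cons_of_mem _ ha)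
      rw [n_d b hb]
      omega
  have hdone' : ∀ p : Int × Int, pvValid L W p → pvGetCell r.1 p.1 p.2 ≠ -1 → p ∉ r.2 →
      ∀ dxy ∈ pvDirs, pvValid L W (p.1 + dxy.1, p.2 + dxy.2) →
        pvGetCell r.1 (p.1 + dxy.1) (p.2 + dxy.2) ≠ -1 := by
    intro p hV hpa hpnot dxy hdm hnv
    rcases adown p hV hpa with hold | hnew
    · by_cases hpq : p = ((x, y) : Int × Int)
      · have hTgt : pvTarget x y pvDirs ((p.1 + dxy.1, p.2 + dxy.2) : Int × Int) :=
          ⟨dxy, hdm, by rw [hpq]⟩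
        by_cases hm : pvGetCell re (p.1 + dxy.1) (p.2 + dxy.2) = -1
        · exact n_assigned _ ((n_mem _).mpr ⟨hTgt, hnv, hm⟩)
        · exact aup _ hnv.1 hnv.2.2.1 hm
      · by_cases hpr : p ∈ rest
        · exact absurd (by rw [F4]; exact List.mem_append.mpr (Or.inl hpr)) hpnot
        · have hnotq : p ∉ ((x, y) :: rest : List (Int × Int)) := by
            intro h
            rcases List.mem_cons.mp h with h | h
            · exact hpq h
            · exact hpr h
          have := hinv.done p hV hold hnotq dxy hdm hnv
          exact aup _ hnv.1 hnv.2.2.1 this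
    · exact absurd (by rw [F4]; exact List.mem_append.mpr (Or.inr hnew)) hpnot
  refine ⟨⟨F1, ?_, ?_, ?_, ?_, by rw [F4]; exact hnodup', by rw [F4]; exact hsorted', ?_, ?_, ?_⟩, ?_⟩
  · -- src
    intro s hsS
    exact aup s (hSv s hsS).1 (hSv s hsS).2.2.1 (hinv.src s hsS)
  · -- aval
    intro c hV ha
    rcases adown c hV ha with hold | hnew
    · rw [unchanged c hV.1 hV.2.2.1 hold]
      exact hinv.aval c hV hold
    · rw [n_val c hnew]
      exact (n_d c hnew).symm
  · -- qvalid
    intro e he; exact hqvalid' e (by rwa [F4] at he)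
  · -- qassigned
    intro e he; exact hqassigned' e (by rwa [F4] at he)
  · -- qbound
    intro q' rest' hq' e he
    have hq'mem : q' ∈ r.2 := by rw [hq']; exact List.mem_cons_self
    rw [F4] at hq'mem he
    have hq'2 : pvD S ((x, y) : Int × Int) ≤ pvD S q' := by
      rcases List.mem_append.mp hq'mem with h | h
      · exact hrest_ge q' h
      · rw [n_d q' h, hvd]; omega
    rcases List.mem_append.mp he with h | h
    · have := hall_le e (List.mem_cons_of_mem _ h)
      omega
    · have := n_d e h
      omega
  · -- qfrontier
    intro q' rest' hq' c hV hle
    have hq'mem : q' ∈ r.2 := by rw [hq']; exact List.mem_cons_self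
    rw [F4] at hq'mem
    have hq'2 : pvD S q' = pvD S ((x, y) : Int × Int) ∨
        pvD S q' = pvD S ((x, y) : Int × Int) + 1 := by
      rcases List.mem_append.mp hq'mem with h | h
      · have h1 := hrest_ge q' h
        have h2 := hall_le q' (List.mem_cons_of_mem _ h)
        omega
      · rw [n_d q' h, hvd]; omega
    by_cases hle2 : pvD S c ≤ pvD S ((x, y) : Int × Int)
    · exact aup c hV.1 hV.2.2.1 (hinv.qfrontier (x, y) rest rfl c hV hle2)
    · have hceq : pvD S c = pvD S ((x, y) : Int × Int) + 1 := by
        rcases hq'2 with h | h <;> omega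
      have hc1 : 1 ≤ pvD S c := by
        have := pvD_nonneg hS ((x, y) : Int × Int)
        omega
      obtain ⟨dxy, hdm, hpv, hpd⟩ := pvD_step hS hSv hV hc1
      have hpd' : pvD S ((c.1 + dxy.1, c.2 + dxy.2) : Int × Int) =
          pvD S ((x, y) : Int × Int) := by omega
      have hpa : pvGetCell r.1 (c.1 + dxy.1) (c.2 + dxy.2) ≠ -1 :=
        aup _ hpv.1 hpv.2.2.1
          (hinv.qfrontier (x, y) rest rfl _ hpv (by omega))
      have hsorted2 : ∀ e ∈ rest', pvD S q' ≤ pvD S e := by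
        have h := hsorted'
        rw [show rest ++ news = q' :: rest' from F4 ▸ hq'] at h
        exact (List.pairwise_cons.mp h).1
      have hpnot : ((c.1 + dxy.1, c.2 + dxy.2) : Int × Int) ∉ r.2 := by
        rw [hq']
        intro hmem
        rcases List.mem_cons.mp hmem with h | h
        · rw [h] at hpd'
          rcases hq'2 with h2 | h2 <;> omega
        · have := hsorted2 _ h
          rcases hq'2 with h2 | h2 <;> omega
      have := hdone' _ hpv hpa hpnot (-dxy.1, -dxy.2) (pvDirs_neg hdm)
        (by simpa using hV)
      simpa using this
  · -- done
    intro c hV ha hnot dxy hdm hnv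
    exact hdone' c hV ha (by rwa [F4] at hnot ⊢) dxy hdm hnv
  · -- measure
    have := F5 hv0
    simp only [List.length_cons]
    rw [F4] at this ⊢
    simp only [List.length_append] at this ⊢
    omega

-- ---- termination of the invariant: empty queue means everything is assigned ----
lemma pvInv_complete {L W : Nat} {S : List (Int × Int)} (hS : S ≠ [])
    (hSv : ∀ s ∈ S, pvValid L W s) {re : List (List Int)}
    (hinv : PvInv L W S (re, [])) :
    ∀ c : Int × Int, pvValid L W c → pvGetCell re c.1 c.2 ≠ -1 := by
  suffices h : ∀ n : Nat, ∀ c : Int × Int, pvValid L W c → pvD S c = (n : Int) →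
      pvGetCell re c.1 c.2 ≠ -1 by
    intro c hV
    have h0 := pvD_nonneg hS c
    exact h (pvD S c).toNat c hV (by omega)
  intro n
  induction n with
  | zero =>
    intro c hV h0
    exact hinv.src c (mem_of_pvD_zero hS (by exact_mod_cast h0))
  | succ n ih =>
    intro c hV hn
    obtain ⟨dxy, hdm, hpv, hpd⟩ := pvD_step hS hSv hV (by omega)
    have hp := ih _ hpv (by push_cast at hn ⊢; omega)
    have := hinv.done _ hpv hp (List.not_mem_nil) (-dxy.1, -dxy.2) (pvDirs_neg hdm)
      (by simpa using hV)
    simpa using this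

-- ---- the loop ----
lemma pvBfs_nil {L W : Nat} (fuel : Nat) (re : List (List Int)) :
    pvBfs L W fuel (re, []) = re := by
  cases fuel <;> rfl

lemma pvBfs_correct {L W : Nat} {S : List (Int × Int)} (hS : S ≠ [])
    (hSv : ∀ s ∈ S, pvValid L W s) :
    ∀ (fuel : Nat) (st : List (List Int) × List (Int × Int)), PvInv L W S st →
      2 * pvU L W st.1 + st.2.length ≤ fuel →
      pvDims L W (pvBfs L W fuel st)
      ∧ ∀ c : Int × Int, pvValid L W c → pvGetCell (pvBfs L W fuel st) c.1 c.2 = pvD S c := by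
  intro fuel
  induction fuel with
  | zero =>
    rintro ⟨re, Q⟩ hinv hb
    have hb' : 2 * pvU L W re + Q.length ≤ 0 := hb
    have hQ : Q = [] := List.length_eq_zero_iff.mp (by omega)
    subst hQ
    have hall : ∀ c : Int × Int, pvValid L W c → pvGetCell re c.1 c.2 ≠ -1 := by
      intro c hV
      have hU : pvU L W re = 0 := by omega
      have := List.countP_eq_zero.mp hU _ (mem_pvAll.mpr hV)
      simpa using this
    exact ⟨hinv.dims, fun c hV => hinv.aval c hV (hall c hV)⟩
  | succ n ih =>
    rintro ⟨re, Q⟩ hinv hb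
    cases Q with
    | nil =>
      have hall := pvInv_complete hS hSv hinv
      exact ⟨hinv.dims, fun c hV => hinv.aval c hV (hall c hV)⟩
    | cons q rest =>
      obtain ⟨x, y⟩ := q
      obtain ⟨hinv', hm⟩ := pvInv_maintain hS hSv hinv
      have hstep : pvBfs L W (n + 1) (re, (x, y) :: rest) =
          pvBfs L W n (pvDirs.foldl (pvStep L W x y) (re, rest)) := rfl
      rw [hstep]
      apply ih _ hinv'
      have hb' : 2 * pvU L W re + ((x, y) :: rest).length ≤ n + 1 := hb
      simp only [List.length_cons] at hb' hm
      omega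

-- ---- init characterization ----
lemma pvInitRow (m : List (List Int)) (L W : Nat) (i : Nat) (hiL : i < L) :
    ∀ K, K ≤ W → ∀ st : List (List Int) × List (Int × Int), pvDims L W st.1 →
      pvDims L W ((List.range K).foldl (fun st2 j => pvInitStep m st2 i j) st).1
      ∧ (∀ c : Int × Int, pvValid L W c → c.1 = (i : Int) → c.2 < (K : Int) →
          pvGetCell ((List.range K).foldl (fun st2 j => pvInitStep m st2 i j) st).1 c.1 c.2
            = if pvMval m c = 1 then 0 else -1)
      ∧ (∀ c : Int × Int, 0 ≤ c.1 → 0 ≤ c.2 → (c.1 ≠ (i : Int) ∨ (K : Int) ≤ c.2) →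
          pvGetCell ((List.range K).foldl (fun st2 j => pvInitStep m st2 i j) st).1 c.1 c.2
            = pvGetCell st.1 c.1 c.2)
      ∧ ((List.range K).foldl (fun st2 j => pvInitStep m st2 i j) st).2
          = st.2 ++ (List.range K).filterMap (fun j =>
              if (m.getD i []).getD j 0 = 1 then some ((i : Int), (j : Int)) else none) := by
  intro K
  induction K with
  | zero =>
    intro _ st hd
    exact ⟨hd, fun c _ _ h2 => absurd h2 (by omega), fun c _ _ _ => rfl, by simp⟩
  | succ K ih =>
    intro hK st hd
    obtain ⟨I1, I2, I3, I4⟩ := ih (by omega) st hd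
    rw [List.range_succ, List.foldl_append]
    simp only [List.foldl_cons, List.foldl_nil]
    set st1 := (List.range K).foldl (fun st2 j => pvInitStep m st2 i j) st with hst1
    set cK : Int × Int := ((i : Int), (K : Int)) with hcK
    have hvK : pvValid L W cK := ⟨by simp [hcK], by simp [hcK]; omega, by simp [hcK], by simp [hcK]; omega⟩
    have ht1 : cK.1.toNat = i := by simp [hcK]
    have ht2 : cK.2.toNat = K := by simp [hcK]
    have hmv : ∀ c : Int × Int, c = cK → pvMval m c = (m.getD i []).getD K 0 := by
      rintro c rfl; rw [pvMval, ht1, ht2]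
    have hstep : ∀ v : Int, pvSetCell st1.1 i K v = pvSetCell st1.1 cK.1.toNat cK.2.toNat v := by
      intro v; rw [ht1, ht2]
    have hval_same : ∀ v : Int, pvGetCell (pvSetCell st1.1 i K v) cK.1 cK.2 = v := by
      intro v; rw [hstep]; exact pvGet_set_same I1 hvK v
    have hval_other : ∀ (v : Int) (c : Int × Int), 0 ≤ c.1 → 0 ≤ c.2 → c ≠ cK →
        pvGetCell (pvSetCell st1.1 i K v) c.1 c.2 = pvGetCell st1.1 c.1 c.2 := by
      intro v c n1 n2 hne; rw [hstep]; exact pvGet_set_other I1 hvK n1 n2 hne v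
    have hdims : ∀ v : Int, pvDims L W (pvSetCell st1.1 i K v) := by
      intro v; rw [hstep]; exact pvDims_set I1 hvK v
    by_cases hcase : (m.getD i []).getD K 0 = 1
    · have hss : pvInitStep m st1 i K = (pvSetCell st1.1 i K 0, st1.2 ++ [cK]) := by
        rw [pvInitStep, if_pos hcase]
      rw [hss]
      refine ⟨hdims 0, ?_, ?_, ?_⟩
      · intro c hV h1 h2
        by_cases hc : c = cK
        · rw [hc, hval_same, hmv cK rfl, if_pos hcase]
        · have h3 : c.2 < (K : Int) := by
            rcases (by omega : c.2 < (K:Int) ∨ c.2 = (K:Int)) with h | h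
            · exact h
            · exact absurd (Prod.ext (by rw [h1, hcK]) (by rw [h, hcK])) hc
          rw [hval_other 0 c hV.1 hV.2.2.1 hc]
          exact I2 c hV h1 h3
      · intro c n1 n2 hdisj
        have hc : c ≠ cK := by
          rintro rfl
          rcases hdisj with h | h
          · exact h (by rw [hcK])
          · rw [hcK] at h; simp at h
        rw [hval_other 0 c n1 n2 hc]
        refine I3 c n1 n2 ?_
        rcases hdisj with h | h
        · exact Or.inl h
        · exact Or.inr (by omega)
      · show st1.2 ++ [cK] = _
        rw [I4, List.filterMap_append, ← List.append_assoc]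
        congr 1
        simp only [List.filterMap_cons, List.filterMap_nil, if_pos hcase, hcK]
    · have hss : pvInitStep m st1 i K = (pvSetCell st1.1 i K (-1), st1.2) := by
        rw [pvInitStep, if_neg hcase]
      rw [hss]
      refine ⟨hdims (-1), ?_, ?_, ?_⟩
      · intro c hV h1 h2
        by_cases hc : c = cK
        · rw [hc, hval_same, hmv cK rfl, if_neg hcase]
        · have h3 : c.2 < (K : Int) := by
            rcases (by omega : c.2 < (K:Int) ∨ c.2 = (K:Int)) with h | h
            · exact h
            · exact absurd (Prod.ext (by rw [h1, hcK]) (by rw [h, hcK])) hc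
          rw [hval_other (-1) c hV.1 hV.2.2.1 hc]
          exact I2 c hV h1 h3
      · intro c n1 n2 hdisj
        have hc : c ≠ cK := by
          rintro rfl
          rcases hdisj with h | h
          · exact h (by rw [hcK])
          · rw [hcK] at h; simp at h
        rw [hval_other (-1) c n1 n2 hc]
        refine I3 c n1 n2 ?_
        rcases hdisj with h | h
        · exact Or.inl h
        · exact Or.inr (by omega)
      · show st1.2 = _
        rw [I4, List.filterMap_append]
        simp only [List.filterMap_cons, List.filterMap_nil, if_neg hcase, List.append_nil]

lemma pvInitAll (m : List (List Int)) (L W : Nat) :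
    ∀ K, K ≤ L → ∀ st : List (List Int) × List (Int × Int), pvDims L W st.1 →
      pvDims L W ((List.range K).foldl
        (fun st i => (List.range W).foldl (fun st2 j => pvInitStep m st2 i j) st) st).1
      ∧ (∀ c : Int × Int, pvValid L W c → c.1 < (K : Int) →
          pvGetCell ((List.range K).foldl
            (fun st i => (List.range W).foldl (fun st2 j => pvInitStep m st2 i j) st) st).1 c.1 c.2
            = if pvMval m c = 1 then 0 else -1)
      ∧ ((List.range K).foldl
          (fun st i => (List.range W).foldl (fun st2 j => pvInitStep m st2 i j) st) st).2
          = st.2 ++ (List.range K).flatMap (fun (i : Nat) =>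
              (List.range W).filterMap (fun (j : Nat) =>
                if (m.getD i []).getD j 0 = 1 then some ((i : Int), (j : Int)) else none)) := by
  intro K
  induction K with
  | zero =>
    intro _ st hd
    exact ⟨hd, fun c _ h2 => absurd h2 (by omega), by simp⟩
  | succ K ih =>
    intro hK st hd
    obtain ⟨I1, I2, I3⟩ := ih (by omega) st hd
    rw [List.range_succ, List.foldl_append]
    simp only [List.foldl_cons, List.foldl_nil]
    set st1 := (List.range K).foldl
      (fun st i => (List.range W).foldl (fun st2 j => pvInitStep m st2 i j) st) st with hst1
    obtain ⟨R1, R2, R3, R4⟩ := pvInitRow m L W K (by omega) W (le_refl W) st1 I1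
    refine ⟨R1, ?_, ?_⟩
    · intro c hV h1
      by_cases hc : c.1 = (K : Int)
      · exact R2 c hV hc hV.2.2.2
      · rw [R3 c hV.1 hV.2.2.1 (Or.inl hc)]
        exact I2 c hV (by omega)
    · rw [R4, I3, List.flatMap_append, List.append_assoc]
      simp

lemma pvInit_char (m : List (List Int)) (L W : Nat) :
    pvDims L W (pvInit m L W).1
    ∧ (∀ c : Int × Int, pvValid L W c →
        pvGetCell (pvInit m L W).1 c.1 c.2 = if pvMval m c = 1 then 0 else -1)
    ∧ (pvInit m L W).2 = pvLands m L W := by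
  have hd0 : pvDims L W (List.replicate L (List.replicate W (0 : Int))) := by
    refine ⟨by simp, ?_⟩
    intro row hrow
    rw [List.eq_of_mem_replicate hrow]
    simp
  obtain ⟨A1, A2, A3⟩ := pvInitAll m L W L (le_refl L)
    ((List.replicate L (List.replicate W (0 : Int)), []) :
      List (List Int) × List (Int × Int)) hd0
  refine ⟨A1, ?_, ?_⟩
  · intro c hV
    exact A2 c hV hV.2.1
  · rw [pvInit] at *
    rw [A3]
    simp [pvLands]

lemma mem_pvLands {m : List (List Int)} {L W : Nat} {c : Int × Int} :
    c ∈ pvLands m L W ↔ pvValid L W c ∧ pvMval m c = 1 := by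
  rw [pvLands]
  constructor
  · intro h
    obtain ⟨i, hi, hmem⟩ := List.mem_flatMap.mp h
    rw [List.mem_range] at hi
    obtain ⟨j, hj, hc⟩ := List.mem_filterMap.mp hmem
    rw [List.mem_range] at hj
    split_ifs at hc with hcnd
    obtain rfl := (Option.some.inj hc).symm
    refine ⟨⟨by simp, by simpa using hi, by simp, by simpa using hj⟩, ?_⟩
    rw [pvMval]; simpa using hcnd
  · rintro ⟨⟨h1, h2, h3, h4⟩, hm⟩
    refine List.mem_flatMap.mpr ⟨c.1.toNat, List.mem_range.mpr (by omega), ?_⟩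
    refine List.mem_filterMap.mpr ⟨c.2.toNat, List.mem_range.mpr (by omega), ?_⟩
    rw [if_pos (by rwa [pvMval] at hm)]
    congr 1
    ext <;> simp <;> omega

lemma nodup_pvLands {m : List (List Int)} {L W : Nat} : (pvLands m L W).Nodup := by
  rw [pvLands, List.nodup_flatMap]
  constructor
  · intro i _
    refine List.Nodup.filterMap ?_ List.nodup_range
    intro a b c hca hcb
    rw [Option.mem_def] at hca hcb
    split_ifs at hca hcb
    · obtain rfl := (Option.some.inj hca).symm
      have := congrArg Prod.snd (Option.some.inj hcb)
      simpa using this.symm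
  · refine List.Pairwise.imp ?_ (List.pairwise_lt_range)
    intro a b hab x hx hy
    obtain ⟨j, _, hj⟩ := List.mem_filterMap.mp hx
    obtain ⟨k, _, hk⟩ := List.mem_filterMap.mp hy
    split_ifs at hj hk
    obtain rfl := (Option.some.inj hj).symm
    have := congrArg Prod.fst (Option.some.inj hk)
    simp at this
    omega

-- ---- grid extensionality ----
lemma pvGrid_ext {L W : Nat} {g : List (List Int)} (hd : pvDims L W g)
    (f : Nat → Nat → Int)
    (h : ∀ i < L, ∀ j < W, pvGetCell g (i : Int) (j : Int) = f i j) :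
    g = (List.range L).map (fun i => (List.range W).map (fun j => f i j)) := by
  obtain ⟨hL, hW⟩ := hd
  apply List.ext_getElem
  · simp [hL]
  · intro i h1 h2
    have hiL : i < L := by simpa [hL] using h1
    rw [List.getElem_map, List.getElem_range]
    apply List.ext_getElem
    · rw [hW _ (List.getElem_mem h1)]; simp
    · intro j hj1 hj2
      have hjW : j < W := by
        have := hW _ (List.getElem_mem h1); omega
      rw [List.getElem_map, List.getElem_range]
      have hv := h i hiL j hjW
      rw [pvGetCell] at hv
      simp only [Int.toNat_natCast] at hv
      rw [List.getD_eq_getElem g [] h1] at hv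
      rwa [List.getD_eq_getElem _ 0 hj1] at hv

-- ---- assembling the equivalence ----
lemma pvValid_cast {L W i j : Nat} (hi : i < L) (hj : j < W) :
    pvValid L W (((i : Nat) : Int), ((j : Nat) : Int)) :=
  ⟨by simp, by simpa using hi, by simp, by simpa using hj⟩

lemma land_eq_alt (matrix : List (List Int)) : land matrix = land_alt matrix := by
  set L := matrix.length with hLdef
  set W := ((PySem.List.pyGet? matrix 0).getD []).length with hWdef
  set S := pvLands matrix L W with hSdef
  obtain ⟨A1, A2, A3⟩ := pvInit_char matrix L W
  rw [← hSdef] at A3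
  show pvBfs L W (2 * L * W) (pvInit matrix L W)
      = (List.range L).map (fun (i : Nat) => (List.range W).map (fun (j : Nat) => pvD S ((i : Int), (j : Int))))
  by_cases hS : S = []
  · -- no land cell anywhere: the queue starts empty and nothing changes
    have hsplit : pvInit matrix L W = ((pvInit matrix L W).1, []) :=
      Prod.ext rfl (by rw [A3, hS])
    rw [hsplit, pvBfs_nil]
    apply pvGrid_ext A1
    intro i hi j hj
    rw [A2 _ (pvValid_cast hi hj)]
    rw [if_neg (fun hm => by
      have : ((i : Int), (j : Int)) ∈ S := mem_pvLands.mpr ⟨pvValid_cast hi hj, hm⟩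
      rw [hS] at this
      simp at this)]
    rw [hS, pvD_nil]
  · have hSv : ∀ s ∈ S, pvValid L W s := fun s hs => (mem_pvLands.mp hs).1
    have hsrc : ∀ s ∈ S, pvGetCell (pvInit matrix L W).1 s.1 s.2 ≠ -1 := by
      intro s hs
      rw [A2 s (hSv s hs), if_pos (mem_pvLands.mp hs).2]
      omega
    have hinv : PvInv L W S (pvInit matrix L W) := by
      refine ⟨A1, hsrc, ?_, ?_, ?_, ?_, ?_, ?_, ?_, ?_⟩
      · -- aval
        intro c hV ha
        rw [A2 c hV] at ha ⊢
        by_cases hm : pvMval matrix c = 1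
        · rw [if_pos hm, pvD_zero_of_mem (mem_pvLands.mpr ⟨hV, hm⟩)]
        · rw [if_neg hm] at ha
          exact absurd rfl ha
      · -- qvalid
        intro q hq; rw [A3] at hq; exact hSv q hq
      · -- qassigned
        intro q hq; rw [A3] at hq; exact hsrc q hq
      · -- qnodup
        rw [A3]; exact nodup_pvLands
      · -- qsorted
        rw [A3]
        exact List.pairwise_of_forall_mem_list (fun a ha b hb => by
          rw [pvD_zero_of_mem ha, pvD_zero_of_mem hb])
      · -- qbound
        intro q rest hq e he
        rw [A3] at he
        have hqS : q ∈ S := by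
          rw [← A3, hq]; exact List.mem_cons_self
        rw [pvD_zero_of_mem he, pvD_zero_of_mem hqS]
        omega
      · -- qfrontier
        intro q rest hq c hV hle
        have hqS : q ∈ S := by
          rw [← A3, hq]; exact List.mem_cons_self
        rw [pvD_zero_of_mem hqS] at hle
        have h0 := pvD_nonneg hS c
        have : c ∈ S := mem_of_pvD_zero hS (by omega)
        exact hsrc c this
      · -- done
        intro c hV ha hnot
        exfalso
        rw [A2 c hV] at ha
        by_cases hm : pvMval matrix c = 1
        · exact hnot (by rw [A3]; exact mem_pvLands.mpr ⟨hV, hm⟩)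
        · rw [if_neg hm] at ha
          exact ha rfl
    have hfuel : 2 * pvU L W (pvInit matrix L W).1 + (pvInit matrix L W).2.length
        ≤ 2 * L * W := by
      set p : Int × Int → Bool := fun c => pvGetCell (pvInit matrix L W).1 c.1 c.2 == -1 with hp
      have hlen : (pvAll L W).length = L * W := length_pvAll
      have hsplit := List.length_eq_length_filter_add (l := pvAll L W) p
      have hsubQ : (pvInit matrix L W).2 ⊆ (pvAll L W).filter (fun c => !(p c)) := by
        intro q hq
        rw [A3] at hq
        rw [List.mem_filter]
        refine ⟨mem_pvAll.mpr (hSv q hq), ?_⟩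
        simp [hp, hsrc q hq]
      have hndQ : (pvInit matrix L W).2.Nodup := by rw [A3]; exact nodup_pvLands
      have hQle : (pvInit matrix L W).2.length ≤ ((pvAll L W).filter (fun c => !(p c))).length :=
        (List.subperm_of_subset hndQ hsubQ).length_le
      have hUeq : pvU L W (pvInit matrix L W).1 = ((pvAll L W).filter p).length := by
        rw [pvU, List.countP_eq_length_filter]
      have h2LW : 2 * L * W = 2 * (pvAll L W).length := by rw [hlen]; ring
      rw [h2LW, hUeq]
      omega
    obtain ⟨hdimsR, hvalR⟩ := pvBfs_correct hS hSv (2 * L * W) (pvInit matrix L W) hinv hfuel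
    apply pvGrid_ext hdimsR
    intro i hi j hj
    exact hvalR _ (pvValid_cast hi hj)

-- ===== VERDICT (by name: the statement is the Claim_ definition above) =====
theorem land_spec : Claim_equal_land := by
  intro matrix _ _
  unfold Spec_land
  exact land_eq_alt matrix
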